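-- pv_equiv track=rewrite | github.com/fpaupier/samu_social | src/domain/model_couple.py | create_couples
-- ===== SOURCE A (Python) =====
-- def create_couples(persons):
--     """
--     Create a list of couples without duplicate
--
--     Args:
--         persons (list[str]):
--
--     Returns:
--         list[set(str)]
--     """
--     list_of_couples = []
--     for p1 in persons:
--         for p2 in persons:
--             couple = {p1, p2}
--             if couple not in list_of_couples:
--                 list_of_couples += [couple]
--     return list_of_couples
-- ===== SOURCE B (Python) =====
-- def create_couples(persons):
--     """
--     Create a list of couples without duplicate.
--
--     Deduplicate first (preserving first-appearance order), then emit each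
--     unordered couple exactly once with a triangular pass over the suffixes,
--     so no membership test on the output list is ever needed.
--     """
--     u = list(dict.fromkeys(persons))
--     out = []
--     while u:
--         p1 = u[0]
--         out += [{p1, p2} for p2 in u]
--         u = u[1:]
--     return out
-- ===== Notes on version B (the rewrite author's own statement) =====
-- stated objective: faster
-- what changed: Instead of scanning the output list for every (p1,p2) pair drawn from the raw input, B deduplicates persons once (dict.fromkeys) and emits each couple exactly once via a triangular pass over suffixes of the deduplicated list, removing the inner membership scan entirely.
import Mathlib
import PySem

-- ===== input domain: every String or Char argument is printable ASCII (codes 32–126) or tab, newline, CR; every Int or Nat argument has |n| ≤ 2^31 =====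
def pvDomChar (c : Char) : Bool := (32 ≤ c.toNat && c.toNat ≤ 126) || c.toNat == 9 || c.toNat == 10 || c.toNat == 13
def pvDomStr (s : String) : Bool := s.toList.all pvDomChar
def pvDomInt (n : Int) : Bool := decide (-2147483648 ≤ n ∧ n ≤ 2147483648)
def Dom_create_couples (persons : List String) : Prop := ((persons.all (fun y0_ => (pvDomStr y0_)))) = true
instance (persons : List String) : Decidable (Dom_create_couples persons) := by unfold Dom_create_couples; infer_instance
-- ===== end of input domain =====

-- B deduplicates the input once and emits each couple exactly once by a triangular
-- pass over suffixes, removing A's membership scan of the output list (faster).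


-- ===== PORT A =====
-- inner-loop body: couple = {p1, p2}; if couple not in acc2: acc2 += [couple]
def stepA (p1 : String) (acc2 : List (List String)) (p2 : String) : List (List String) :=
  let couple := PySem.Set.ofList [p1, p2]
  if acc2.any (fun d => PySem.Set.equal d couple) then acc2 else acc2 ++ [couple]

def create_couples (persons : List String) : List (List String) :=
  persons.foldl (fun acc p1 => persons.foldl (stepA p1) acc) []

-- ===== PORT B =====
-- while u: p1 = u[0]; out += [{p1, p2} for p2 in u]; u = u[1:]
def triB : List String → List (List String)
  | [] => []
  | p1 :: rest => (p1 :: rest).map (fun p2 => PySem.Set.ofList [p1, p2]) ++ triB rest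

def create_couples_alt (persons : List String) : List (List String) :=
  triB (PySem.List.dedup persons)

-- ===== PRECONDITION & SPEC =====
def Spec_create_couples (persons : List String) (out : List (List String)) : Prop := out = create_couples_alt persons
instance (persons : List String) (out : List (List String)) : Decidable (Spec_create_couples persons out) := by unfold Spec_create_couples; infer_instance

-- ===== CLAIM (what is proved, stated in full; the proofs are below) =====
def Claim_equal_create_couples : Prop := ∀ (persons : List String), Dom_create_couples persons → Spec_create_couples persons (create_couples persons)

-- ===== LEMMAS AND PROOFS =====

-- a couple {p, q}
def cpl (p q : String) : List String := PySem.Set.ofList [p, q]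

-- A's accumulator after the distinct persons in s have been processed,
-- r being the distinct persons not yet seen (s ++ r = dedup persons)
def triOn : List String → List String → List (List String)
  | [], _ => []
  | p1 :: s', r => (p1 :: (s' ++ r)).map (fun p2 => cpl p1 p2) ++ triOn s' r

lemma triOn_nil (s : List String) : triOn s [] = triB s := by
  induction s with
  | nil => rfl
  | cons p s ih => simp [triOn, triB, ih, cpl]

lemma triOn_snoc (s r : List String) (p : String) :
    triOn (s ++ [p]) r = triOn s (p :: r) ++ (p :: r).map (fun q => cpl p q) := by
  induction s with
  | nil => simp [triOn]
  | cons a s ih =>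
      simp only [List.cons_append, triOn, ih, List.append_assoc]
      simp

lemma mem_cpl (x a b : String) : x ∈ cpl a b ↔ (x = a ∨ x = b) := by
  simp [cpl, PySem.Set.mem_ofList]

lemma equal_cpl_iff (a b p q : String) :
    PySem.Set.equal (cpl a b) (cpl p q) = true ↔ ((a = p ∧ b = q) ∨ (a = q ∧ b = p)) := by
  rw [PySem.Set.equal_iff]
  simp only [mem_cpl]
  constructor
  · intro h
    have ha := (h a).mp (by tauto)
    have hb := (h b).mp (by tauto)
    have hp := (h p).mpr (by tauto)
    have hq := (h q).mpr (by tauto)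
    rcases ha with ha | ha <;> rcases hb with hb | hb <;> subst_vars <;> tauto
  · rintro (⟨rfl, rfl⟩ | ⟨rfl, rfl⟩) x <;> tauto

lemma equal_cpl_self (p q : String) : PySem.Set.equal (cpl p q) (cpl p q) = true := by
  rw [equal_cpl_iff]; tauto

lemma mem_triOn (c : List String) (s r : List String) (h : c ∈ triOn s r) :
    ∃ a u, a ∈ s ∧ c = cpl a u := by
  induction s generalizing c with
  | nil => simp [triOn] at h
  | cons p s ih =>
      simp only [triOn, List.mem_append, List.mem_map] at h
      rcases h with ⟨u, _, rfl⟩ | h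
      · exact ⟨p, u, by simp⟩
      · obtain ⟨a, u, ha, rfl⟩ := ih _ h
        exact ⟨a, u, by simp [ha]⟩

-- if p ∈ s (and q occurs at all), the couple {p,q} is already in triOn s r
lemma mem_triOn_intro (s r : List String) (p q : String) (hp : p ∈ s) (hq : q ∈ s ++ r) :
    ((triOn s r).any fun d => PySem.Set.equal d (cpl p q)) = true := by
  induction s generalizing q with
  | nil => simp at hp
  | cons a s ih =>
      rw [List.any_eq_true]
      rcases List.mem_cons.mp hp with rfl | hps
      · refine ⟨cpl p q, ?_, equal_cpl_self p q⟩
        simp only [triOn]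
        have hq2 : q ∈ p :: (s ++ r) := by simpa using hq
        exact List.mem_append_left _ (List.mem_map.mpr ⟨q, hq2, rfl⟩)
      · by_cases hqa : q = a
        · subst hqa
          refine ⟨cpl q p, ?_, by rw [equal_cpl_iff]; tauto⟩
          simp only [triOn]
          have hp2 : p ∈ q :: (s ++ r) := by simp [hps]
          exact List.mem_append_left _ (List.mem_map.mpr ⟨p, hp2, rfl⟩)
        · have hq3 : q ∈ a :: (s ++ r) := by simpa using hq
          have hq' : q ∈ s ++ r := by
            rcases List.mem_cons.mp hq3 with h | h
            · exact absurd h hqa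
            · exact h
          have := ih q hps hq'
          rw [List.any_eq_true] at this
          obtain ⟨d, hd, hde⟩ := this
          exact ⟨d, by simp only [triOn]; exact List.mem_append_right _ hd, hde⟩

-- no couple {p1,p2} with p1, p2 both outside s occurs in triOn s r
lemma not_mem_triOn (s r : List String) (p1 p2 : String) (h1 : p1 ∉ s) (h2 : p2 ∉ s) :
    ((triOn s r).any fun d => PySem.Set.equal d (cpl p1 p2)) = false := by
  rw [List.any_eq_false]
  intro d hd
  obtain ⟨a, u, ha, rfl⟩ := mem_triOn d s r hd
  rw [Bool.not_eq_true, Bool.eq_false_iff, Ne, equal_cpl_iff]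
  rintro (⟨rfl, rfl⟩ | ⟨rfl, rfl⟩)
  · exact h1 ha
  · exact h2 ha

-- stepA's membership test sees {p,q} and {q,p} alike
lemma equal_cpl_comm (d : List String) (p q : String) :
    PySem.Set.equal d (cpl p q) = PySem.Set.equal d (cpl q p) := by
  apply Bool.eq_iff_iff.mpr
  rw [PySem.Set.equal_iff, PySem.Set.equal_iff]
  constructor <;> intro h x <;> rw [h x] <;> simp only [mem_cpl] <;> tauto

lemma any_equal_cpl_symm (acc : List (List String)) (p q : String) :
    (acc.any fun d => PySem.Set.equal d (cpl p q)) = (acc.any fun d => PySem.Set.equal d (cpl q p)) := by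
  rw [show (fun d => PySem.Set.equal d (cpl p q)) = (fun d => PySem.Set.equal d (cpl q p)) from
    funext fun d => equal_cpl_comm d p q]

-- the inner loop is a no-op when p1 has already been seen
lemma inner_seen (s r : List String) (p1 : String) (hp1 : p1 ∈ s) (zs : List String)
    (hz : ∀ x ∈ zs, x ∈ s ++ r) :
    zs.foldl (stepA p1) (triOn s r) = triOn s r := by
  induction zs with
  | nil => rfl
  | cons z zs ih =>
      rw [List.foldl_cons]
      have hcond : ((triOn s r).any fun d => PySem.Set.equal d (cpl p1 z)) = true :=
        mem_triOn_intro s r p1 z hp1 (hz z (by simp))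
      have : stepA p1 (triOn s r) z = triOn s r := by
        simp only [stepA]
        rw [show PySem.Set.ofList [p1, z] = cpl p1 z from rfl, hcond]
        simp
      rw [this]
      exact ih (fun x hx => hz x (by simp [hx]))

-- the inner loop for the first unseen person p1 appends exactly the new row
lemma inner_new (s r' : List String) (p1 : String) (hU : (s ++ p1 :: r').Nodup)
    (zs : List String) : ∀ w, (∀ x ∈ zs, x ∈ s ++ p1 :: r') →
    zs.foldl (stepA p1)
      (triOn s (p1 :: r') ++ (w.filter (fun x => decide (x ∈ p1 :: r'))).map (fun q => cpl p1 q))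
    = triOn s (p1 :: r') ++
        ((zs.foldl PySem.Set.add w).filter (fun x => decide (x ∈ p1 :: r'))).map (fun q => cpl p1 q) := by
  have hdisj : ∀ x, x ∈ s → x ∈ p1 :: r' → False :=
    fun x h1 h2 => (List.nodup_append.mp hU).2.2 x h1 x h2 rfl
  have hp1s : p1 ∉ s := fun h => hdisj p1 h (by simp)
  induction zs with
  | nil => intro w _; rfl
  | cons z zs ih =>
      intro w hz
      have hzU : z ∈ s ++ p1 :: r' := hz z (by simp)
      rw [List.foldl_cons, List.foldl_cons]
      have hstep : stepA p1
          (triOn s (p1 :: r') ++ (w.filter (fun x => decide (x ∈ p1 :: r'))).map (fun q => cpl p1 q)) z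
          = triOn s (p1 :: r') ++
            ((PySem.Set.add w z).filter (fun x => decide (x ∈ p1 :: r'))).map (fun q => cpl p1 q) := by
        simp only [stepA]
        rw [show PySem.Set.ofList [p1, z] = cpl p1 z from rfl]
        rw [List.any_append]
        by_cases hzs : z ∈ s
        · -- already-seen person: the test is true via the triangular part; the add is filtered away
          rw [any_equal_cpl_symm, mem_triOn_intro s (p1 :: r') z p1 hzs (by simp)]
          simp only [Bool.true_or, if_true]
          have hznr : z ∉ p1 :: r' := fun h => hdisj z hzs h
          rw [PySem.Set.add_eq_ite]
          split
          · rfl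
          · obtain ⟨h2a, h2b⟩ := not_or.mp (by simpa using hznr)
            rw [List.filter_append]
            simp [h2a, h2b]
        · have hzr : z ∈ p1 :: r' := by
            rcases List.mem_append.mp hzU with h | h
            · exact absurd h hzs
            · exact h
          rw [not_mem_triOn s (p1 :: r') p1 z hp1s hzs]
          simp only [Bool.false_or]
          by_cases hzw : z ∈ w
          · -- couple already produced in this row
            have hsome : ((w.filter (fun x => decide (x ∈ p1 :: r'))).map (fun q => cpl p1 q)).any
                (fun d => PySem.Set.equal d (cpl p1 z)) = true := by
              rw [List.any_map]
              rw [List.any_eq_true]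
              refine ⟨z, List.mem_filter.mpr ⟨hzw, by simp [hzr]⟩, ?_⟩
              simp only [Function.comp]
              exact equal_cpl_self p1 z
            rw [hsome]
            simp [PySem.Set.add_of_mem hzw]
          · -- genuinely new couple
            have hnone : ((w.filter (fun x => decide (x ∈ p1 :: r'))).map (fun q => cpl p1 q)).any
                (fun d => PySem.Set.equal d (cpl p1 z)) = false := by
              rw [List.any_map]
              rw [List.any_eq_false]
              intro x hx
              have hxw : x ∈ w := (List.mem_filter.mp hx).1
              simp only [Function.comp]
              intro hcontra
              rw [equal_cpl_iff] at hcontra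
              rcases hcontra with ⟨-, rfl⟩ | ⟨rfl, rfl⟩ <;> exact hzw hxw
            rw [hnone]
            rw [if_neg (by simp)]
            rw [PySem.Set.add_of_not_mem hzw, List.filter_append, List.map_append,
              List.append_assoc]
            rcases List.mem_cons.mp hzr with h3 | h3 <;> simp [h3]
      rw [hstep]
      exact ih (PySem.Set.add w z) (fun x hx => hz x (by simp [hx]))

lemma prefix_foldl_add (zs : List String) (s : List String) :
    s <+: zs.foldl PySem.Set.add s := by
  induction zs generalizing s with
  | nil => exact List.prefix_rfl
  | cons z zs ih =>
      refine List.IsPrefix.trans ?_ (ih (PySem.Set.add s z))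
      rw [PySem.Set.add_eq_ite]
      split
      · exact List.prefix_rfl
      · exact ⟨[z], rfl⟩

lemma filter_append_nodup (s t : List String) (h : (s ++ t).Nodup) :
    (s ++ t).filter (fun x => decide (x ∈ t)) = t := by
  rw [List.filter_append]
  have hd : ∀ x, x ∈ s → x ∈ t → False :=
    fun x h1 h2 => (List.nodup_append.mp h).2.2 x h1 x h2 rfl
  rw [List.filter_eq_nil_iff.mpr, List.filter_eq_self.mpr]
  · simp
  · intro a ha; simpa using ha
  · intro a ha hat
    exact hd a ha (by simpa using hat)

lemma main_loop (persons : List String) (ys : List String) :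
    ∀ s r, s ++ r = PySem.List.dedup persons →
      ys.foldl PySem.Set.add s = PySem.List.dedup persons →
      (∀ x ∈ ys, x ∈ persons) →
    ys.foldl (fun acc p1 => persons.foldl (stepA p1) acc) (triOn s r) = triB (s ++ r) := by
  have hmemU : ∀ x ∈ persons, x ∈ PySem.List.dedup persons := by
    intro x hx; rw [PySem.List.mem_dedup]; exact hx
  induction ys with
  | nil =>
      intro s r hsr hfold _
      simp only [List.foldl_nil] at hfold ⊢
      have hr : r = [] := by
        have : s ++ r = s ++ [] := by rw [hsr, hfold]; simp
        exact List.append_cancel_left this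
      subst hr
      rw [List.append_nil]
      exact triOn_nil s
  | cons p1 ys ih =>
      intro s r hsr hfold hmem
      rw [List.foldl_cons] at hfold ⊢
      have hp1U : p1 ∈ PySem.List.dedup persons := hmemU p1 (hmem p1 (by simp))
      by_cases hp1 : p1 ∈ s
      · have hadd : PySem.Set.add s p1 = s := PySem.Set.add_of_mem hp1
        rw [hadd] at hfold
        have hin : persons.foldl (stepA p1) (triOn s r) = triOn s r :=
          inner_seen s r p1 hp1 persons (fun x hx => hsr ▸ hmemU x hx)
        rw [hin]
        exact ih s r hsr hfold (fun x hx => hmem x (by simp [hx]))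
      · have hadd : PySem.Set.add s p1 = s ++ [p1] := PySem.Set.add_of_not_mem hp1
        rw [hadd] at hfold
        have hpre : s ++ [p1] <+: s ++ r := by
          rw [hsr, ← hfold]; exact prefix_foldl_add ys (s ++ [p1])
        have hpr : [p1] <+: r := (List.prefix_append_right_inj s).mp hpre
        obtain ⟨r', rfl⟩ := hpr
        have hsr' : s ++ p1 :: r' = PySem.List.dedup persons := by simpa using hsr
        have hN : (s ++ p1 :: r').Nodup := by
          rw [hsr']
          exact PySem.List.nodup_dedup (xs := persons)
        have hin : persons.foldl (stepA p1) (triOn s (p1 :: r')) =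
            triOn (s ++ [p1]) r' := by
          have h0 := inner_new s r' p1 hN persons []
            (fun x hx => hsr ▸ hmemU x hx)
          simp only [List.filter_nil, List.map_nil, List.append_nil] at h0
          rw [h0]
          have hse : persons.foldl PySem.Set.add [] = s ++ p1 :: r' := by
            rw [hsr', PySem.List.dedup_eq_ofList, PySem.Set.ofList_eq_foldl]
          rw [hse, filter_append_nodup s (p1 :: r') hN, triOn_snoc]
        simp only [List.singleton_append] at hin ⊢
        rw [hin]
        have := ih (s ++ [p1]) r' (by simpa using hsr) hfold
          (fun x hx => hmem x (by simp [hx]))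
        simpa using this

-- ===== VERDICT (by name: the statement is the Claim_ definition above) =====
theorem create_couples_spec : Claim_equal_create_couples := by
  intro persons _
  unfold Spec_create_couples create_couples create_couples_alt
  have h := main_loop persons persons [] (PySem.List.dedup persons) (by simp)
    (by rw [PySem.List.dedup_eq_ofList, PySem.Set.ofList_eq_foldl]) (fun x hx => hx)
  simpa [triOn] using h
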